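-- pv_equiv track=rewrite | github.com/lrslab/Hammerhead-motif | hammermotif/motif_merger.py | _extract_gap_pattern
-- ===== SOURCE A (Python) =====
-- def _extract_gap_pattern(motif: str) -> tuple:
--     """Extract the gap pattern from a gapped motif."""
--     # Return positions and lengths of N regions
--     gaps = []
--     in_gap = False
--     gap_start = 0
--     gap_length = 0
--
--     for i, char in enumerate(motif):
--         if char == 'N':
--             if not in_gap:
--                 in_gap = True
--                 gap_start = i
--                 gap_length = 1
--             else:
--                 gap_length += 1
--         else:
--             if in_gap:
--                 gaps.append((gap_start, gap_length))
--                 in_gap = False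
--
--     if in_gap:  # Gap at the end
--         gaps.append((gap_start, gap_length))
--
--     return tuple(gaps)
-- ===== SOURCE B (Python) =====
-- def _extract_gap_pattern(motif: str) -> tuple:
--     """Extract the gap pattern from a gapped motif."""
--     gaps = []
--     i = 0
--     n = len(motif)
--     while i < n:
--         if motif[i] == 'N':
--             j = i
--             while j < n and motif[j] == 'N':
--                 j += 1
--             gaps.append((i, j - i))
--             i = j
--         else:
--             i += 1
--     return tuple(gaps)
-- ===== Notes on version B (the rewrite author's own statement) =====
-- stated objective: alternative
-- what changed: Replaced the in_gap/gap_start/gap_length flag state machine with a two-pointer run skipper: at each gap character an inner loop finds the end of the maximal run and emits (start, length) at once, so no flags or end-of-string fixup are needed.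
import Mathlib
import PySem

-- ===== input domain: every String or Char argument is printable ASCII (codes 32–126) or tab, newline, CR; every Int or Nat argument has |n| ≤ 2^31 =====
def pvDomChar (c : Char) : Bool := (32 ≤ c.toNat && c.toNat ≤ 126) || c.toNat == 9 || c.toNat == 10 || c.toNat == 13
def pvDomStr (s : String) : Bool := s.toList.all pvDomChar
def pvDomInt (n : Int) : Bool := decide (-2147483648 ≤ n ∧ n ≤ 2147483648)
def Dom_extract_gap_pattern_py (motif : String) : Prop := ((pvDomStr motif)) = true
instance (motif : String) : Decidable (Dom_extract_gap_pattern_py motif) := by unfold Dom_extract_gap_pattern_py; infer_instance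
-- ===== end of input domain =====

-- B replaces A's in_gap/gap_start/gap_length flag state machine by a two-pointer run skipper
-- (alternative decomposition; same O(n) cost).


-- ===== PORT A =====
-- A's for-loop over enumerate(motif) with state (gaps, in_gap, gap_start, gap_length),
-- plus the trailing `if in_gap` append.
def pvALoop : List Char → Int → Bool → Int → Int → List (Int × Int) → List (Int × Int)
  | [], _, in_gap, gap_start, gap_length, gaps =>
      if in_gap then gaps ++ [(gap_start, gap_length)] else gaps
  | c :: rest, i, in_gap, gap_start, gap_length, gaps =>
      if c = 'N' then
        if !in_gap then pvALoop rest (i + 1) true i 1 gaps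
        else pvALoop rest (i + 1) true gap_start (gap_length + 1) gaps
      else
        if in_gap then pvALoop rest (i + 1) false gap_start gap_length (gaps ++ [(gap_start, gap_length)])
        else pvALoop rest (i + 1) false gap_start gap_length gaps

def extract_gap_pattern_py (motif : String) : List (Int × Int) :=
  pvALoop motif.toList 0 false 0 0 []

-- ===== PORT B =====
-- B's inner `while j < n and motif[j] == 'N'` : count the leading run of 'N's and return the rest.
def pvSkipN : List Char → Nat × List Char
  | [] => (0, [])
  | c :: rest =>
      if c = 'N' then
        let (k, r) := pvSkipN rest
        (k + 1, r)
      else (0, c :: rest)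

theorem pvSkipN_len : ∀ (l : List Char), (pvSkipN l).2.length ≤ l.length
  | [] => Nat.le_refl _
  | c :: rest => by
      simp only [pvSkipN]
      split
      · exact le_trans (pvSkipN_len rest) (Nat.le_succ _)
      · exact Nat.le_refl _

-- B's outer `while i < n` loop, advancing by the whole run when an 'N' is seen.
def pvBLoop : List Char → Int → List (Int × Int)
  | [], _ => []
  | c :: rest, i =>
      if c = 'N' then
        (i, ((pvSkipN rest).1 : Int) + 1) :: pvBLoop (pvSkipN rest).2 (i + (pvSkipN rest).1 + 1)
      else pvBLoop rest (i + 1)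
  termination_by l _ => l.length
  decreasing_by
  · exact Nat.lt_succ_of_le (pvSkipN_len rest)
  · simp

def extract_gap_pattern_py_alt (motif : String) : List (Int × Int) :=
  pvBLoop motif.toList 0

-- ===== PRECONDITION & SPEC =====
def Spec_extract_gap_pattern_py (motif : String) (out : List (Int × Int)) : Prop := out = extract_gap_pattern_py_alt motif
instance (motif : String) (out : List (Int × Int)) : Decidable (Spec_extract_gap_pattern_py motif out) := by unfold Spec_extract_gap_pattern_py; infer_instance

-- ===== CLAIM (what is proved, stated in full; the proofs are below) =====
def Claim_equal_extract_gap_pattern_py : Prop := ∀ (motif : String), Dom_extract_gap_pattern_py motif → Spec_extract_gap_pattern_py motif (extract_gap_pattern_py motif)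

-- ===== LEMMAS AND PROOFS =====

-- Combined invariant, by strong induction on the list length:
-- (1) out of a gap, A's loop appends exactly B's remaining output;
-- (2) inside a gap of current start gs / length gl, A's loop emits (gs, gl + run-remainder)
--     and then agrees with B after the run.
theorem pvLoop_inv : ∀ (l : List Char),
    (∀ (i gs gl : Int) (gaps : List (Int × Int)),
        pvALoop l i false gs gl gaps = gaps ++ pvBLoop l i) ∧
    (∀ (i gs gl : Int) (gaps : List (Int × Int)),
        pvALoop l i true gs gl gaps =
          gaps ++ (gs, gl + ((pvSkipN l).1 : Int)) :: pvBLoop (pvSkipN l).2 (i + (pvSkipN l).1)) := by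
  intro l
  induction l with
  | nil =>
    constructor
    · intro i gs gl gaps; simp [pvALoop, pvBLoop]
    · intro i gs gl gaps; simp [pvALoop, pvBLoop, pvSkipN]
  | cons c rest ih =>
    constructor
    · intro i gs gl gaps
      by_cases hc : c = 'N'
      · subst hc
        simp only [pvALoop, pvBLoop, Bool.not_false, if_pos]
        rw [ih.2]
        ring_nf
      · simp only [pvALoop, pvBLoop, if_neg hc]
        exact ih.1 (i + 1) gs gl gaps
    · intro i gs gl gaps
      by_cases hc : c = 'N'
      · subst hc
        simp only [pvALoop, pvSkipN, Bool.not_true, Bool.false_eq_true, if_false]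
        rw [ih.2]
        push_cast
        ring_nf
      · simp only [pvALoop, pvSkipN, if_neg hc]
        rw [ih.1 (i + 1) gs gl (gaps ++ [(gs, gl)])]
        simp only [pvBLoop, if_neg hc]
        simp

-- ===== VERDICT (by name: the statement is the Claim_ definition above) =====
theorem extract_gap_pattern_py_spec : Claim_equal_extract_gap_pattern_py := by
  intro motif _
  unfold Spec_extract_gap_pattern_py extract_gap_pattern_py extract_gap_pattern_py_alt
  simpa using (pvLoop_inv motif.toList).1 0 0 0 []
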